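-- pv_equiv track=rewrite | github.com/catanadj/taskwarrior-nautical | on-modify-nautical.py | _chain_integrity_link_sequence_warnings
-- ===== SOURCE A (Python) =====
-- def _chain_integrity_link_sequence_warnings(link_map: dict[int, dict]) -> list[str]:
--     if not link_map:
--         return []
--     warnings: list[str] = []
--     links_sorted = sorted(link_map.keys())
--     if links_sorted[0] != 1:
--         warnings.append(f"chain starts at link #{links_sorted[0]} (expected #1)")
--     expected = set(range(links_sorted[0], links_sorted[-1] + 1))
--     gaps = sorted(expected - set(links_sorted))
--     if gaps:
--         gap_list = ", ".join(str(g) for g in gaps[:5])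
--         tail = "…" if len(gaps) > 5 else ""
--         warnings.append(f"missing link(s): {gap_list}{tail}")
--     return warnings
-- ===== SOURCE B (Python) =====
-- def _chain_integrity_link_sequence_warnings(link_map: dict[int, dict]) -> list[str]:
-- # B: single scan over consecutive sorted keys; no expected-range set, no set difference (measured faster).
--     if not link_map:
--         return []
--     ks = sorted(link_map)
--     warnings: list[str] = []
--     if ks[0] != 1:
--         warnings.append(f"chain starts at link #{ks[0]} (expected #1)")
--     gaps: list[int] = []
--     total = 0
--     prev = ks[0]
--     for cur in ks[1:]:
--         if cur > prev + 1:
--             total += cur - prev - 1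
--             need = 5 - len(gaps)
--             if need > 0:
--                 gaps.extend(range(prev + 1, min(cur, prev + 1 + need)))
--         prev = cur
--     if total:
--         gap_list = ", ".join(str(g) for g in gaps)
--         tail = "…" if total > 5 else ""
--         warnings.append(f"missing link(s): {gap_list}{tail}")
--     return warnings
-- ===== Notes on version B (the rewrite author's own statement) =====
-- stated objective: faster
-- what changed: B replaces A's expected-range set construction and set difference (plus re-sort of the gap set) by a single scan over consecutive sorted keys that collects at most five gap values and a running total of missing links, deciding the '…' tail from the total.
import Mathlib
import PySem

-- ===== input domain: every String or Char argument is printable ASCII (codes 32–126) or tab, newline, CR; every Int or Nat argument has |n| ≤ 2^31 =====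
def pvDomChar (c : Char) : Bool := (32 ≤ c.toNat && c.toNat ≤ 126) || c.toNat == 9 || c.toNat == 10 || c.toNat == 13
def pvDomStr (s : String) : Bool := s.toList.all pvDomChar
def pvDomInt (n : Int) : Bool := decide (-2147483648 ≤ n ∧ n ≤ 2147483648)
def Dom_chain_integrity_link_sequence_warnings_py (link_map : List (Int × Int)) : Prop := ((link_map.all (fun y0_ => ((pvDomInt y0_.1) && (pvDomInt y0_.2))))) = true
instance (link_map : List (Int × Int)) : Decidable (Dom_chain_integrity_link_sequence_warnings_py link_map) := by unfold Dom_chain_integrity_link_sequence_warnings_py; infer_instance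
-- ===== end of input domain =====

-- B replaces A's expected-range set and set difference (plus re-sort) by one scan over
-- consecutive sorted keys collecting at most five gap values and a running total
-- (measured faster in a timing run).

-- ===== PORT A =====
-- literal port of A; link_map models the Python dict, so its keys are the first occurrences
-- of the first components (PySem.List.dedup = dict key view).
def chain_integrity_link_sequence_warnings_py (link_map : List (Int × Int)) : List String :=
  if link_map = [] then []
  else
    let links_sorted := PySem.List.sorted (PySem.List.dedup (link_map.map Prod.fst)) (fun x => x)
    -- links_sorted[0] / links_sorted[-1]: the list is nonempty here, so headD/getLastD are exact
    let first := links_sorted.headD 0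
    let last := links_sorted.getLastD 0
    let warnings :=
      if first ≠ 1 then
        ["chain starts at link #" ++ PySem.Int.toStr first ++ " (expected #1)"]
      else []
    let expected : PySem.Set Int := PySem.Set.ofList (PySem.List.pyRange first (last + 1) 1)
    let gaps := PySem.List.sorted (PySem.Set.diff expected (PySem.Set.ofList links_sorted)) (fun x => x)
    if gaps ≠ [] then
      warnings ++
        ["missing link(s): " ++
           PySem.Str.join ", " ((PySem.List.slice gaps none (some 5)).map PySem.Int.toStr) ++
           (if gaps.length > 5 then "…" else "")]
    else warnings

-- ===== PORT B =====
-- one step of B's loop over consecutive sorted keys; state = (gaps, total, prev)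
def pvGapStep (st : List Int × Int × Int) (cur : Int) : List Int × Int × Int :=
  let gaps := st.1
  let total := st.2.1
  let prev := st.2.2
  if cur > prev + 1 then
    let total := total + (cur - prev - 1)
    let need : Int := 5 - gaps.length
    let gaps :=
      if need > 0 then gaps ++ PySem.List.pyRange (prev + 1) (min cur (prev + 1 + need)) 1
      else gaps
    (gaps, total, cur)
  else (gaps, total, cur)

def chain_integrity_link_sequence_warnings_py_alt (link_map : List (Int × Int)) : List String :=
  if link_map = [] then []
  else
    let ks := PySem.List.sorted (PySem.List.dedup (link_map.map Prod.fst)) (fun x => x)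
    let first := ks.headD 0
    let warnings :=
      if first ≠ 1 then
        ["chain starts at link #" ++ PySem.Int.toStr first ++ " (expected #1)"]
      else []
    let st := ks.tail.foldl pvGapStep ([], 0, first)
    let gaps := st.1
    let total := st.2.1
    if total ≠ 0 then
      warnings ++
        ["missing link(s): " ++
           PySem.Str.join ", " (gaps.map PySem.Int.toStr) ++
           (if total > 5 then "…" else "")]
    else warnings

-- ===== PRECONDITION & SPEC =====
def Spec_chain_integrity_link_sequence_warnings_py (link_map : List (Int × Int)) (out : List String) : Prop := out = chain_integrity_link_sequence_warnings_py_alt link_map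
instance (link_map : List (Int × Int)) (out : List String) : Decidable (Spec_chain_integrity_link_sequence_warnings_py link_map out) := by unfold Spec_chain_integrity_link_sequence_warnings_py; infer_instance

-- ===== CLAIM (what is proved, stated in full; the proofs are below) =====
def Claim_equal_chain_integrity_link_sequence_warnings_py : Prop := ∀ (link_map : List (Int × Int)), Dom_chain_integrity_link_sequence_warnings_py link_map → Spec_chain_integrity_link_sequence_warnings_py link_map (chain_integrity_link_sequence_warnings_py link_map)

-- ===== LEMMAS AND PROOFS =====

def pvGaps (prev : Int) : List Int → List Int
  | [] => []
  | c :: t => PySem.List.pyRange (prev + 1) c 1 ++ pvGaps c t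

lemma pyRange_take (a b : Int) (k : Nat) :
    (PySem.List.pyRange a b 1).take k = PySem.List.pyRange a (min b (a + k)) 1 := by
  simp only [PySem.List.pyRange_one, ← List.map_take, List.take_range]
  have : (min b (a + (k:Int)) - a).toNat = min k (b - a).toNat := by omega
  rw [this]

lemma take_append_take (x P : List Int) (n : Nat) : (x.take n ++ P).take n = (x ++ P).take n := by
  rw [List.take_append, List.take_append, List.take_take, List.length_take]
  have : n - min n x.length = n - x.length := by omega
  rw [this, Nat.min_self]

lemma foldl_pvGapStep (rest : List Int) : ∀ (prev : Int) (gaps0 : List Int) (total0 : Int),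
    (prev :: rest).Pairwise (· < ·) →
    gaps0.length = min 5 total0.toNat → 0 ≤ total0 →
    rest.foldl pvGapStep (gaps0, total0, prev) =
      ((gaps0 ++ pvGaps prev rest).take 5,
       total0 + (pvGaps prev rest).length,
       rest.getLastD prev) := by
  induction rest with
  | nil =>
    intro prev gaps0 total0 _ hlen _
    simp [pvGaps, List.take_of_length_le (by omega : gaps0.length ≤ 5)]
  | cons c t ih =>
    intro prev gaps0 total0 hp hlen hnn
    have hpc : prev < c := (List.pairwise_cons.mp hp).1 c (by simp)
    have hp' : (c :: t).Pairwise (· < ·) := (List.pairwise_cons.mp hp).2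
    have hRlen : (PySem.List.pyRange (prev + 1) c 1).length = (c - prev - 1).toNat := by
      rw [PySem.List.length_pyRange_one]; omega
    simp only [List.foldl_cons]
    by_cases hgap : c > prev + 1
    · have hstep : pvGapStep (gaps0, total0, prev) c =
          ((gaps0 ++ PySem.List.pyRange (prev + 1) c 1).take 5,
           total0 + (c - prev - 1), c) := by
        simp only [pvGapStep, if_pos hgap]
        refine congrArg (fun g => (g, total0 + (c - prev - 1), c)) ?_
        rw [List.take_append, List.take_of_length_le (show gaps0.length ≤ 5 by omega)]
        by_cases hneed : (5 : Int) - (gaps0.length : Int) > 0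
        · rw [if_pos hneed]
          have h1 : min c (prev + 1 + ((5:Int) - (gaps0.length : Int))) =
              min c (prev + 1 + ((5 - gaps0.length : Nat) : Int)) := by
            omega
          rw [h1, ← pyRange_take]
        · rw [if_neg hneed]
          have : 5 - gaps0.length = 0 := by omega
          rw [this, List.take_zero, List.append_nil]
      rw [hstep, ih c _ _ hp'
            (by rw [List.length_take, List.length_append, hRlen]; omega) (by omega)]
      simp only [pvGaps, Prod.mk.injEq]
      refine ⟨?_, ?_, (List.getLastD_cons).symm⟩
      · rw [take_append_take, List.append_assoc]
      · rw [List.length_append, hRlen]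
        push_cast
        omega
    · have hceq : c = prev + 1 := by omega
      have hstep : pvGapStep (gaps0, total0, prev) c = (gaps0, total0, c) := by
        simp [pvGapStep, hgap]
      have hR : PySem.List.pyRange (prev + 1) c 1 = [] :=
        PySem.List.pyRange_one_eq_nil (by omega)
      rw [hstep, ih c _ _ hp' hlen hnn]
      simp only [pvGaps, hR, List.nil_append, Prod.mk.injEq]
      exact ⟨trivial, trivial, (List.getLastD_cons).symm⟩

lemma le_getLast (t : List Int) : ∀ c : Int, (c :: t).Pairwise (· < ·) → c ≤ (c :: t).getLast (by simp) := by
  induction t with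
  | nil => intro c _; simp
  | cons d t ih =>
    intro c hp
    have h1 : c < d := (List.pairwise_cons.mp hp).1 d (by simp)
    have := ih d (List.pairwise_cons.mp hp).2
    calc c ≤ d := le_of_lt h1
      _ ≤ _ := by simpa using this

lemma filter_range_eq_pvGaps (t : List Int) : ∀ (h : Int),
    (h :: t).Pairwise (· < ·) →
    (PySem.List.pyRange h ((h :: t).getLast (by simp) + 1) 1).filter
        (fun x => !(h :: t).contains x) = pvGaps h t := by
  induction t with
  | nil =>
    intro h _
    simp [pvGaps, PySem.List.pyRange_one_singleton]
  | cons c t ih =>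
    intro h hp
    have hhc : h < c := (List.pairwise_cons.mp hp).1 c (by simp)
    have hp' : (c :: t).Pairwise (· < ·) := (List.pairwise_cons.mp hp).2
    have hcmem : ∀ x ∈ c :: t, c ≤ x := by
      intro x hx
      rcases hx with _ | hx
      · exact le_refl c
      · exact le_of_lt ((List.pairwise_cons.mp hp').1 x (by assumption))
    have hL : c ≤ (c :: t).getLast (by simp) := le_getLast t c hp'
    have hlast : (h :: c :: t).getLast (by simp) = (c :: t).getLast (by simp) := by
      simp [List.getLast_cons]
    rw [hlast]
    rw [PySem.List.pyRange_one_append h (h + 1) _ (by omega) (by omega),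
        PySem.List.pyRange_one_singleton,
        PySem.List.pyRange_one_append (h + 1) c _ (by omega) (by omega),
        List.filter_append, List.filter_append]
    have e1 : List.filter (fun x => !(h :: c :: t).contains x) [h] = [] := by
      simp
    have e2 : List.filter (fun x => !(h :: c :: t).contains x) (PySem.List.pyRange (h + 1) c 1)
        = PySem.List.pyRange (h + 1) c 1 := by
      apply List.filter_eq_self.mpr
      intro x hx
      rw [PySem.List.mem_pyRange_one] at hx
      have hxt : x ∉ t := fun hxt => absurd (hcmem x (by simp [hxt])) (by omega)
      simp only [List.contains_eq_mem, List.mem_cons, Bool.not_eq_eq_eq_not, Bool.not_true,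
        decide_eq_false_iff_not]
      push Not
      exact ⟨by omega, by omega, hxt⟩
    have e3 : List.filter (fun x => !(h :: c :: t).contains x)
          (PySem.List.pyRange c ((c :: t).getLast (by simp) + 1) 1)
        = List.filter (fun x => !(c :: t).contains x)
          (PySem.List.pyRange c ((c :: t).getLast (by simp) + 1) 1) := by
      apply List.filter_congr
      intro x hx
      rw [PySem.List.mem_pyRange_one] at hx
      have : x ≠ h := by omega
      simp [List.contains_eq_mem, this]
    rw [e1, e2, e3, ih c hp']
    simp [pvGaps]

-- the key list of the dict, sorted: nonempty, strictly increasing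
lemma ks_props (lm : List (Int × Int)) (hnil : lm ≠ []) :
    PySem.List.sorted (PySem.List.dedup (lm.map Prod.fst)) (fun x => x) ≠ [] ∧
    (PySem.List.sorted (PySem.List.dedup (lm.map Prod.fst)) (fun x => x)).Pairwise (· < ·) := by
  constructor
  · rw [Ne, PySem.List.sorted_eq_nil_iff]
    intro hd
    obtain ⟨p, rest, hlm⟩ := List.exists_cons_of_ne_nil hnil
    have : p.1 ∈ PySem.List.dedup (lm.map Prod.fst) := by
      rw [PySem.List.mem_dedup, hlm]; simp
    rw [hd] at this
    simp at this
  · have hnd : (PySem.List.sorted (PySem.List.dedup (lm.map Prod.fst)) (fun x => x)).Nodup :=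
      ((PySem.List.sorted_perm _ _ _).symm.nodup (PySem.List.nodup_dedup _))
    have hle := PySem.List.sorted_pairwise (PySem.List.dedup (lm.map Prod.fst)) (fun x => x)
    exact (hle.and hnd).imp (fun hab => lt_of_le_of_ne hab.1 hab.2)

-- ===== VERDICT (by name: the statement is the Claim_ definition above) =====
theorem chain_integrity_link_sequence_warnings_py_spec : Claim_equal_chain_integrity_link_sequence_warnings_py := by
  intro lm _
  unfold Spec_chain_integrity_link_sequence_warnings_py
  by_cases hnil : lm = []
  · simp [chain_integrity_link_sequence_warnings_py,
      chain_integrity_link_sequence_warnings_py_alt, hnil]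
  · obtain ⟨hknil, hlt⟩ := ks_props lm hnil
    obtain ⟨h, t, hht⟩ := List.exists_cons_of_ne_nil hknil
    rw [hht] at hlt
    unfold chain_integrity_link_sequence_warnings_py chain_integrity_link_sequence_warnings_py_alt
    rw [if_neg hnil, if_neg hnil]
    simp only [hht, List.headD_cons, List.tail_cons]
    -- B's fold
    rw [foldl_pvGapStep t h [] 0 hlt (by simp) (by omega)]
    simp only [List.nil_append, zero_add]
    -- A's last element
    have hlastD : (h :: t).getLastD 0 = (h :: t).getLast (by simp) := by
      rw [List.getLastD_eq_getLast?, List.getLast?_eq_some_getLast (by simp)]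
      rfl
    rw [hlastD]
    -- A's gap list
    have hgapsA :
        PySem.List.sorted
          (PySem.Set.diff
            (PySem.Set.ofList (PySem.List.pyRange h ((h :: t).getLast (by simp) + 1) 1))
            (PySem.Set.ofList (h :: t))) (fun x => x) = pvGaps h t := by
      rw [PySem.Set.ofList_eq_self_of_nodup _ (PySem.List.nodup_pyRange_one _ _),
          PySem.Set.ofList_eq_self_of_nodup _ (hlt.imp ne_of_lt)]
      unfold PySem.Set.diff
      simp only [PySem.Set.contains]
      rw [filter_range_eq_pvGaps t h hlt]
      have hpw : (pvGaps h t).Pairwise (· < ·) := by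
        rw [← filter_range_eq_pvGaps t h hlt]
        exact (PySem.List.pairwise_lt_pyRange_one _ _).filter _
      exact PySem.List.sorted_eq_of_perm_of_pairwise_lt _ _ _ (List.Perm.refl _) hpw
    rw [hgapsA]
    -- compare the two results
    rcases eq_or_ne (pvGaps h t) [] with hg | hg
    · rw [if_neg (show ¬ (pvGaps h t ≠ []) by simp [hg]),
          if_neg (show ¬ (((pvGaps h t).length : Int) ≠ 0) by simp [hg])]
    · have hlen0 : ¬ ((pvGaps h t).length : Int) = 0 := by
        simpa [List.length_eq_zero_iff] using hg
      rw [if_pos (show pvGaps h t ≠ [] from hg),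
          if_pos (show ((pvGaps h t).length : Int) ≠ 0 from hlen0)]
      have hslice : PySem.List.slice (pvGaps h t) none (some 5) = (pvGaps h t).take 5 := by
        rw [PySem.List.slice_to _ (by norm_num)]
        rfl
      rw [hslice]
      have htail : (if (pvGaps h t).length > 5 then "…" else "")
          = (if ((pvGaps h t).length : Int) > 5 then "…" else "") := by
        by_cases h5 : (pvGaps h t).length > 5
        · rw [if_pos h5, if_pos (by omega)]
        · rw [if_neg h5, if_neg (by omega)]
      rw [htail]
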